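-- pv_equiv track=rewrite | github.com/michaelmnguyenn/3350R | _extras/build_report_docx.py | linear_math_text
-- ===== SOURCE A (Python) =====
-- def math_segments(text: str) -> list[tuple[str, bool, bool]]:
--     """
--     Parse a math expression into (segment_text, is_subscript, is_superscript).
--
--     Handles LaTeX-style notation:
--       x_t        → x normal, t subscript
--       x_{T+1}    → x normal, T+1 subscript
--       x^2        → x normal, 2 superscript
--       x^{abc}    → x normal, abc superscript
--
--     Unicode sub/superscript characters (₁ ² etc.) are left as-is in normal runs.
--     """
--     segments: list[tuple[str, bool, bool]] = []
--     i = 0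
--     base = ""
--     n = len(text)
--
--     while i < n:
--         c = text[i]
--
--         if c == '_' and i + 1 < n:
--             if base:
--                 segments.append((base, False, False))
--                 base = ""
--             i += 1
--             if i < n and text[i] == '{':
--                 try:
--                     end = text.index('}', i + 1)
--                     segments.append((text[i + 1:end], True, False))
--                     i = end + 1
--                 except ValueError:
--                     base += '_'
--             else:
--                 # Single-character subscript
--                 segments.append((text[i], True, False))
--                 i += 1
--
--         elif c == '^' and i + 1 < n:
--             if base:
--                 segments.append((base, False, False))
--                 base = ""
--             i += 1
--             if i < n and text[i] == '{':
--                 try: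
--                     end = text.index('}', i + 1)
--                     segments.append((text[i + 1:end], False, True))
--                     i = end + 1
--                 except ValueError:
--                     base += '^'
--             else:
--                 segments.append((text[i], False, True))
--                 i += 1
--
--         else:
--             base += c
--             i += 1
--
--     if base:
--         segments.append((base, False, False))
--     return segments
--
-- SUBSCRIPT_MAP = str.maketrans({
--     "0": "₀", "1": "₁", "2": "₂", "3": "₃", "4": "₄",
--     "5": "₅", "6": "₆", "7": "₇", "8": "₈", "9": "₉",
--     "+": "₊", "-": "₋", "=": "₌", "(": "₍", ")": "₎",
--     "a": "ₐ", "e": "ₑ", "h": "ₕ", "i": "ᵢ", "j": "ⱼ",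
--     "k": "ₖ", "l": "ₗ", "m": "ₘ", "n": "ₙ", "o": "ₒ",
--     "p": "ₚ", "r": "ᵣ", "s": "ₛ", "t": "ₜ", "u": "ᵤ",
--     "v": "ᵥ", "x": "ₓ",
--     ",": ",", "T": "T", "C": "C", "Y": "Y",
-- })
--
-- SUPERSCRIPT_MAP = str.maketrans({
--     "0": "⁰", "1": "¹", "2": "²", "3": "³", "4": "⁴",
--     "5": "⁵", "6": "⁶", "7": "⁷", "8": "⁸", "9": "⁹",
--     "+": "⁺", "-": "⁻", "=": "⁼", "(": "⁽", ")": "⁾",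
--     "i": "ⁱ", "n": "ⁿ", "j": "ʲ",
-- })
--
-- def linear_math_text(text: str) -> str:
--     """
--     Convert simple LaTeX-ish sub/superscript markers to visible Unicode
--     characters before placing the result inside a Word OMML equation object.
--     This keeps formulas readable in Word without relying on code-font runs.
--     """
--     parts = math_segments(text)
--     converted: list[str] = []
--     for seg_text, is_sub, is_sup in parts:
--         if is_sub:
--             converted.append(seg_text.translate(SUBSCRIPT_MAP))
--         elif is_sup:
--             converted.append(seg_text.translate(SUPERSCRIPT_MAP))
--         else:
--             converted.append(seg_text)
--     return "".join(converted)
-- ===== SOURCE B (Python) =====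
-- SUB = {
--     "0": "₀", "1": "₁", "2": "₂", "3": "₃", "4": "₄",
--     "5": "₅", "6": "₆", "7": "₇", "8": "₈", "9": "₉",
--     "+": "₊", "-": "₋", "=": "₌", "(": "₍", ")": "₎",
--     "a": "ₐ", "e": "ₑ", "h": "ₕ", "i": "ᵢ", "j": "ⱼ",
--     "k": "ₖ", "l": "ₗ", "m": "ₘ", "n": "ₙ", "o": "ₒ",
--     "p": "ₚ", "r": "ᵣ", "s": "ₛ", "t": "ₜ", "u": "ᵤ",
--     "v": "ᵥ", "x": "ₓ",
-- }
--
-- SUP = {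
--     "0": "⁰", "1": "¹", "2": "²", "3": "³", "4": "⁴",
--     "5": "⁵", "6": "⁶", "7": "⁷", "8": "⁸", "9": "⁹",
--     "+": "⁺", "-": "⁻", "=": "⁼", "(": "⁽", ")": "⁾",
--     "i": "ⁱ", "n": "ⁿ", "j": "ʲ",
-- }
--
-- def linear_math_text(text: str) -> str:
--     """Single pass: walk the text once and emit converted characters directly."""
--     out = []
--     i, n = 0, len(text)
--     while i < n:
--         c = text[i]
--         if (c == '_' or c == '^') and i + 1 < n:
--             table = SUB if c == '_' else SUP
--             if text[i + 1] == '{':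
--                 j = text.find('}', i + 2)
--                 if j == -1:
--                     out.append(c)     # unclosed brace: keep the marker, rescan from '{'
--                     i += 1
--                 else:
--                     out.extend(table.get(ch, ch) for ch in text[i + 2:j])
--                     i = j + 1
--             else:
--                 nxt = text[i + 1]
--                 out.append(table.get(nxt, nxt))
--                 i += 2
--         else:
--             out.append(c)
--             i += 1
--     return ''.join(out)
-- ===== Notes on version B (the rewrite author's own statement) =====
-- stated objective: faster
-- what changed: B replaces A's two-pass pipeline (a math_segments tokenizer building segment strings via repeated 'base += c' concatenation, then a translate-and-join pass) with one single-pass scan that looks up each sub/superscript character in a dict and appends converted output pieces to a list joined once.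
import Mathlib
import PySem

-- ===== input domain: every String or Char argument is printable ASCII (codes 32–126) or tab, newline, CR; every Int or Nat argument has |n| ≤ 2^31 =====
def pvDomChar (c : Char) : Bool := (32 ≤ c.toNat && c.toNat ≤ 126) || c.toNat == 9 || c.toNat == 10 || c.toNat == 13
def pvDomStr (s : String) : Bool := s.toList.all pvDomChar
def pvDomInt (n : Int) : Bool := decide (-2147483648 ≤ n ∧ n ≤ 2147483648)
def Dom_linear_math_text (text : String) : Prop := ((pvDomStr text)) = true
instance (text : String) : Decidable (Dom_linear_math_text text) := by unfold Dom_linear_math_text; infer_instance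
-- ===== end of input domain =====

-- B rewrites linear_math_text as a single pass that emits the converted output directly,
-- dropping A's tokenize-into-segments-then-translate two-pass pipeline and its repeated
-- string concatenation (objective: faster; measured faster in a timing run).

-- ===== PORT A =====

-- SUBSCRIPT_MAP as a char translation (identity entries included; translate leaves unmapped chars unchanged)
def subChar (c : Char) : Char :=
  match c with
  | '0' => '₀' | '1' => '₁' | '2' => '₂' | '3' => '₃' | '4' => '₄'
  | '5' => '₅' | '6' => '₆' | '7' => '₇' | '8' => '₈' | '9' => '₉'
  | '+' => '₊' | '-' => '₋' | '=' => '₌' | '(' => '₍' | ')' => '₎'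
  | 'a' => 'ₐ' | 'e' => 'ₑ' | 'h' => 'ₕ' | 'i' => 'ᵢ' | 'j' => 'ⱼ'
  | 'k' => 'ₖ' | 'l' => 'ₗ' | 'm' => 'ₘ' | 'n' => 'ₙ' | 'o' => 'ₒ'
  | 'p' => 'ₚ' | 'r' => 'ᵣ' | 's' => 'ₛ' | 't' => 'ₜ' | 'u' => 'ᵤ'
  | 'v' => 'ᵥ' | 'x' => 'ₓ'
  | ',' => ',' | 'T' => 'T' | 'C' => 'C' | 'Y' => 'Y'
  | c => c

-- SUPERSCRIPT_MAP
def supChar (c : Char) : Char :=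
  match c with
  | '0' => '⁰' | '1' => '¹' | '2' => '²' | '3' => '³' | '4' => '⁴'
  | '5' => '⁵' | '6' => '⁶' | '7' => '⁷' | '8' => '⁸' | '9' => '⁹'
  | '+' => '⁺' | '-' => '⁻' | '=' => '⁼' | '(' => '⁽' | ')' => '⁾'
  | 'i' => 'ⁱ' | 'n' => 'ⁿ' | 'j' => 'ʲ'
  | c => c

-- text.index('}', i+1) on the remaining suffix: split at the first '}'
-- (some (before, after) iff a '}' occurs; none = ValueError); exact for the single-char search.
def splitAtBrace : List Char → Option (List Char × List Char)
  | [] => none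
  | c :: r => if c = '}' then some ([], r)
              else (splitAtBrace r).map (fun p => (c :: p.1, p.2))

theorem splitAtBrace_len : ∀ {l b a : List Char}, splitAtBrace l = some (b, a) → a.length < l.length := by
  intro l
  induction l with
  | nil => intro b a h; simp [splitAtBrace] at h
  | cons c r ih =>
    intro b a h
    simp only [splitAtBrace] at h
    split at h
    · simp at h
      obtain ⟨-, h2⟩ := h
      subst h2; simp
    · cases hr : splitAtBrace r with
      | none => rw [hr] at h; simp at h
      | some p =>
        rw [hr] at h; simp at h
        obtain ⟨-, h2⟩ := h
        have := ih (b := p.1) (a := p.2) (by rw [hr])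
        subst h2; simp; omega

-- the while loop of math_segments: state = (accumulated base, remaining text);
-- the '[c]' pattern is a final marker char with i+1 = n, which falls to the else branch
def segsA (base : List Char) : List Char → List (List Char × Bool × Bool)
  | [] => if base = [] then [] else [(base, false, false)]
  | [c] => segsA (base ++ [c]) []
  | c :: d :: r2 =>
    if c = '_' then
      (if base = [] then [] else [(base, false, false)]) ++
      (if d = '{' then
        match h : splitAtBrace r2 with
        | some (inner, after) => (inner, true, false) :: segsA [] after
        | none => segsA ['_'] (d :: r2)
       else (([d] : List Char), true, false) :: segsA [] r2)
    else if c = '^' then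
      (if base = [] then [] else [(base, false, false)]) ++
      (if d = '{' then
        match h : splitAtBrace r2 with
        | some (inner, after) => (inner, false, true) :: segsA [] after
        | none => segsA ['^'] (d :: r2)
       else (([d] : List Char), false, true) :: segsA [] r2)
    else
      segsA (base ++ [c]) (d :: r2)
  termination_by l => l.length
  decreasing_by
    all_goals simp_all
    · have := splitAtBrace_len h; omega
    · have := splitAtBrace_len h; omega

-- the for loop of linear_math_text: translate each segment by its flags, then "".join
def linear_math_text (text : String) : String :=
  String.ofList ((segsA [] text.toList).map
    (fun seg => if seg.2.1 then seg.1.map subChar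
                else if seg.2.2 then seg.1.map supChar
                else seg.1)).flatten

-- ===== PORT B =====

-- text.find('}', i+2) restricted to the remaining suffix: index of the first '}', -1 ↦ none; exact.
def findBrace : List Char → Option Nat
  | [] => none
  | c :: r => if c = '}' then some 0 else (findBrace r).map Nat.succ

theorem findBrace_drop_len : ∀ {l : List Char} {k : Nat}, findBrace l = some k → (l.drop (k + 1)).length < l.length := by
  intro l
  induction l with
  | nil => intro k h; simp [findBrace] at h
  | cons c r ih =>
    intro k h
    simp only [findBrace] at h
    split at h
    · simp at h; subst h; simp
    · cases hr : findBrace r with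
      | none => rw [hr] at h; simp at h
      | some m =>
        rw [hr] at h; simp at h
        have := ih (k := m) hr
        subst h; simp at this ⊢; try omega

-- single pass: emit output characters directly; no segment list, no pending-base accumulator
def altGo : List Char → List Char
  | [] => []
  | [c] => [c]
  | c :: d :: r2 =>
    if c = '_' ∨ c = '^' then
      let table := if c = '_' then subChar else supChar
      if d = '{' then
        match h : findBrace r2 with
        | some j => (r2.take j).map table ++ altGo (r2.drop (j + 1))
        | none => c :: altGo (d :: r2)    -- unclosed brace: emit the marker, rescan from '{'
      else table d :: altGo r2
    else
      c :: altGo (d :: r2)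
  termination_by l => l.length
  decreasing_by
    all_goals simp_all
    have := findBrace_drop_len h; omega

def linear_math_text_alt (text : String) : String :=
  String.ofList (altGo text.toList)

-- ===== PRECONDITION & SPEC =====
def Spec_linear_math_text (text : String) (out : String) : Prop := out = linear_math_text_alt text
instance (text : String) (out : String) : Decidable (Spec_linear_math_text text out) := by unfold Spec_linear_math_text; infer_instance

-- ===== CLAIM (what is proved, stated in full; the proofs are below) =====
def Claim_equal_linear_math_text : Prop := ∀ (text : String), Dom_linear_math_text text → Spec_linear_math_text text (linear_math_text text)

-- ===== LEMMAS AND PROOFS =====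

def renderSegs (segs : List (List Char × Bool × Bool)) : List Char :=
  (segs.map (fun seg => if seg.2.1 then seg.1.map subChar
                        else if seg.2.2 then seg.1.map supChar
                        else seg.1)).flatten

theorem renderSegs_cons (s : List Char × Bool × Bool) (ys : List (List Char × Bool × Bool)) :
    renderSegs (s :: ys) =
      (if s.2.1 then s.1.map subChar else if s.2.2 then s.1.map supChar else s.1) ++ renderSegs ys := by
  simp [renderSegs]

theorem renderSegs_flush_append (base : List Char) (ys : List (List Char × Bool × Bool)) :
    renderSegs ((if base = [] then [] else [(base, false, false)]) ++ ys) = base ++ renderSegs ys := by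
  split <;> simp_all [renderSegs]

theorem splitAtBrace_of_findBrace_some : ∀ {l : List Char} {k : Nat},
    findBrace l = some k → splitAtBrace l = some (l.take k, l.drop (k + 1)) := by
  intro l
  induction l with
  | nil => intro k h; simp [findBrace] at h
  | cons c r ih =>
    intro k h
    simp only [findBrace] at h
    split at h <;> rename_i hc
    · simp at h; subst h; simp [splitAtBrace, hc]
    · cases hr : findBrace r with
      | none => rw [hr] at h; simp at h
      | some m =>
        rw [hr] at h; simp at h; subst h
        simp [splitAtBrace, hc, ih hr]

theorem splitAtBrace_of_findBrace_none : ∀ {l : List Char},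
    findBrace l = none → splitAtBrace l = none := by
  intro l
  induction l with
  | nil => intro _; rfl
  | cons c r ih =>
    intro h
    simp only [findBrace] at h
    split at h <;> rename_i hc
    · simp at h
    · cases hr : findBrace r with
      | none => simp [splitAtBrace, hc, ih hr]
      | some m => rw [hr] at h; simp at h

theorem key : ∀ (n : Nat) (l : List Char), l.length ≤ n →
    ∀ base, renderSegs (segsA base l) = base ++ altGo l := by
  intro n
  induction n with
  | zero =>
    intro l hl base
    have : l = [] := by cases l <;> simp_all
    subst this
    rw [segsA, altGo]
    split <;> simp_all [renderSegs]
  | succ n ih =>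
    intro l hl base
    match l with
    | [] =>
      rw [segsA, altGo]
      split <;> simp_all [renderSegs]
    | [c] =>
      rw [segsA, altGo, segsA]
      have hne : base ++ [c] ≠ [] := by simp
      rw [if_neg hne]
      simp [renderSegs]
    | c :: d :: r2 =>
      simp only [List.length_cons] at hl
      rw [segsA, altGo]
      by_cases hc : c = '_'
      · subst hc
        rw [if_pos rfl, if_pos (Or.inl rfl)]
        by_cases hd : d = '{'
        · subst hd
          rw [if_pos rfl, if_pos rfl]
          cases hb : findBrace r2 with
          | some j =>
            rw [splitAtBrace_of_findBrace_some hb]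
            have hlen : (r2.drop (j + 1)).length ≤ n := by
              have := findBrace_drop_len hb; omega
            rw [renderSegs_flush_append, renderSegs_cons, ih _ hlen []]
            simp
          | none =>
            rw [splitAtBrace_of_findBrace_none hb]
            have hlen : ('{' :: r2).length ≤ n := by simp; omega
            rw [renderSegs_flush_append, ih _ hlen ['_']]
            simp
        · rw [if_neg hd, if_neg hd]
          have hlen : r2.length ≤ n := by omega
          rw [renderSegs_flush_append, renderSegs_cons, ih _ hlen []]
          simp
      · rw [if_neg hc]
        by_cases hc2 : c = '^'
        · subst hc2
          rw [if_pos rfl, if_pos (Or.inr rfl)]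
          have hcc : ¬ ('^' : Char) = '_' := by decide
          simp only [if_neg hcc]
          by_cases hd : d = '{'
          · subst hd
            rw [if_pos rfl, if_pos rfl]
            cases hb : findBrace r2 with
            | some j =>
              rw [splitAtBrace_of_findBrace_some hb]
              have hlen : (r2.drop (j + 1)).length ≤ n := by
                have := findBrace_drop_len hb; omega
              rw [renderSegs_flush_append, renderSegs_cons, ih _ hlen []]
              simp
            | none =>
              rw [splitAtBrace_of_findBrace_none hb]
              have hlen : ('{' :: r2).length ≤ n := by simp; omega
              rw [renderSegs_flush_append, ih _ hlen ['^']]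
              simp
          · rw [if_neg hd, if_neg hd]
            have hlen : r2.length ≤ n := by omega
            rw [renderSegs_flush_append, renderSegs_cons, ih _ hlen []]
            simp
        · rw [if_neg hc2, if_neg (by tauto : ¬ (c = '_' ∨ c = '^'))]
          have hlen : (d :: r2).length ≤ n := by simp; omega
          rw [ih _ hlen (base ++ [c])]
          simp

-- ===== VERDICT (by name: the statement is the Claim_ definition above) =====
theorem linear_math_text_spec : Claim_equal_linear_math_text := by
  intro text _
  unfold Spec_linear_math_text linear_math_text linear_math_text_alt
  have h := key text.toList.length text.toList (le_refl _) []
  simp only [renderSegs] at h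
  rw [h]
  rfl
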